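-- pv_equiv track=rewrite | github.com/seohyun-j/Algorithm | Programmers/Level_3/87391.py | solution
-- ===== SOURCE A (Python) =====
-- def solution(n, m, x, y, queries):
--     top = bottom = x
--     left = right = y
--     height, width = n - 1, m - 1
--
--     for command, dx in queries[::-1]:
--         # ← 이동
--         if command == 0:
--             if left == 0:
--                 right = min(width, right + dx)
--             else:
--                 left += dx
--                 right = min(width, right + dx)
--
--         # → 이동
--         elif command == 1:
--             if right == width:
--                 left = max(0, left - dx)
--             else:
--                 left = max(0, left - dx)
--                 right -= dx
--
--         # ↑ 이동
--         elif command == 2: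
--             if top == 0:
--                 bottom = min(height, bottom + dx)
--             else:
--                 top += dx
--                 bottom = min(height, bottom + dx)
--
--         # ↓ 이동
--         else:
--             if bottom == height:
--                 top = max(0, top - dx)
--             else:
--                 top = max(0, top - dx)
--                 bottom -= dx
--
--         if left > right or top > bottom:
--             return 0
--
--     return (bottom - top + 1) * (right - left + 1)
-- ===== SOURCE B (Python) =====
-- def solution(n, m, x, y, queries):
--     height, width = n - 1, m - 1
--
--     def shrink_back(lo, hi, cap, d):
--         # reverse of a move toward index 0 on one axis
--         return (lo + d if lo != 0 else lo, min(cap, hi + d))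
--
--     def shrink_fwd(lo, hi, cap, d):
--         # reverse of a move toward index cap on one axis
--         return (max(0, lo - d), hi - d if hi != cap else hi)
--
--     def step(q, st):
--         # apply one query in reverse to the region; None = region became empty
--         if st is None:
--             return None
--         top, bottom, left, right = st
--         c, d = q
--         if c == 0:
--             left, right = shrink_back(left, right, width, d)
--         elif c == 1:
--             left, right = shrink_fwd(left, right, width, d)
--         elif c == 2:
--             top, bottom = shrink_back(top, bottom, height, d)
--         else:
--             top, bottom = shrink_fwd(top, bottom, height, d)
--         if left > right or top > bottom:
--             return None
--         return (top, bottom, left, right)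
--
--     def run(qs, st):
--         # processes qs in reverse order by balanced divide and conquer
--         if st is None or not qs:
--             return st
--         if len(qs) == 1:
--             return step(qs[0], st)
--         k = len(qs) // 2
--         return run(qs[:k], run(qs[k:], st))
--
--     st = run(queries, (x, x, y, y))
--     if st is None:
--         return 0
--     top, bottom, left, right = st
--     return (bottom - top + 1) * (right - left + 1)
-- ===== Notes on version B (the rewrite author's own statement) =====
-- stated objective: alternative
-- what changed: Replaces the linear loop over reversed(queries) with a balanced divide-and-conquer evaluation of the reverse composition (run(qs) = run(first half) after run(second half), O(log n) recursion depth), threading the region as a single Option-like value (None = empty) through unified per-axis shrink helpers instead of four inline branch blocks with early return.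
import Mathlib
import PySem

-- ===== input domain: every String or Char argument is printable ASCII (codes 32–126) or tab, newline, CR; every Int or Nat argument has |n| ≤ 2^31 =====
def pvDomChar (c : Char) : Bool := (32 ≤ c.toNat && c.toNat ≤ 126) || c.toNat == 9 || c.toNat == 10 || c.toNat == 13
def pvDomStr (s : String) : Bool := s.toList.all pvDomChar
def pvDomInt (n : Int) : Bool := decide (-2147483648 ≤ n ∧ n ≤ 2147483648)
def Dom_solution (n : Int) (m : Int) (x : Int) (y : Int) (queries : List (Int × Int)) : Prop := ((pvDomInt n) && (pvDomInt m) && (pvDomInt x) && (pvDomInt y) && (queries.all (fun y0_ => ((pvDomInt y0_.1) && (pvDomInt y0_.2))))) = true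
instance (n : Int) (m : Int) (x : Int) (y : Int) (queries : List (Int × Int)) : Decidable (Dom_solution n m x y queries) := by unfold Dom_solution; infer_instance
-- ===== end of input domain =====

-- B replaces A's linear loop over reversed(queries) by a balanced divide-and-conquer
-- evaluation of the same reverse composition, with an Option region state (alternative
-- decomposition, not claimed faster).

-- ===== PORT A =====
-- One reverse pass over a 4-tuple state (top, bottom, left, right); queries[::-1]
-- ported as List.reverse (exact for a full negative-step slice).
def loopA (height width : Int) (top bottom left right : Int) (qs : List (Int × Int)) : Int :=
  match qs with
  | [] => (bottom - top + 1) * (right - left + 1)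
  | (command, dx) :: rest =>
    let s : Int × Int × Int × Int :=
      if command = 0 then
        if left = 0 then (top, bottom, left, min width (right + dx))
        else (top, bottom, left + dx, min width (right + dx))
      else if command = 1 then
        if right = width then (top, bottom, max 0 (left - dx), right)
        else (top, bottom, max 0 (left - dx), right - dx)
      else if command = 2 then
        if top = 0 then (top, min height (bottom + dx), left, right)
        else (top + dx, min height (bottom + dx), left, right)
      else
        if bottom = height then (max 0 (top - dx), bottom, left, right)
        else (max 0 (top - dx), bottom - dx, left, right)
    if s.2.2.1 > s.2.2.2 ∨ s.1 > s.2.1 then 0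
    else loopA height width s.1 s.2.1 s.2.2.1 s.2.2.2 rest

def solution (n : Int) (m : Int) (x : Int) (y : Int) (queries : List (Int × Int)) : Int :=
  loopA (n - 1) (m - 1) x x y y queries.reverse

-- ===== PORT B =====
-- Unified per-axis reverse helpers.
def shrinkBack (lo hi cap d : Int) : Int × Int :=
  ((if lo ≠ 0 then lo + d else lo), min cap (hi + d))

def shrinkFwd (lo hi cap d : Int) : Int × Int :=
  (max 0 (lo - d), if hi ≠ cap then hi - d else hi)

-- One query applied in reverse to the region; none = region became empty.
def stepB (height width : Int) (q : Int × Int) (st : Int × Int × Int × Int) :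
    Option (Int × Int × Int × Int) :=
  let s : Int × Int × Int × Int :=
    if q.1 = 0 then
      let p := shrinkBack st.2.2.1 st.2.2.2 width q.2; (st.1, st.2.1, p.1, p.2)
    else if q.1 = 1 then
      let p := shrinkFwd st.2.2.1 st.2.2.2 width q.2; (st.1, st.2.1, p.1, p.2)
    else if q.1 = 2 then
      let p := shrinkBack st.1 st.2.1 height q.2; (p.1, p.2, st.2.2.1, st.2.2.2)
    else
      let p := shrinkFwd st.1 st.2.1 height q.2; (p.1, p.2, st.2.2.1, st.2.2.2)
  if s.2.2.1 > s.2.2.2 ∨ s.1 > s.2.1 then none else some s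

-- Balanced divide and conquer: run qs st processes qs in reverse order
-- (second half first), recursion depth O(log n).
def runB (height width : Int) (qs : List (Int × Int)) (st : Option (Int × Int × Int × Int)) :
    Option (Int × Int × Int × Int) :=
  match st with
  | none => none
  | some s =>
    match qs with
    | [] => some s
    | [q] => stepB height width q s
    | a :: b :: rest =>
      let k := (a :: b :: rest).length / 2
      runB height width ((a :: b :: rest).take k)
        (runB height width ((a :: b :: rest).drop k) (some s))
termination_by qs.length
decreasing_by
  · simp; omega
  · simp; omega

def solution_alt (n : Int) (m : Int) (x : Int) (y : Int) (queries : List (Int × Int)) : Int :=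
  match runB (n - 1) (m - 1) queries (some (x, x, y, y)) with
  | none => 0
  | some (top, bottom, left, right) => (bottom - top + 1) * (right - left + 1)

-- ===== PRECONDITION & SPEC =====
def Spec_solution (n : Int) (m : Int) (x : Int) (y : Int) (queries : List (Int × Int)) (out : Int) : Prop := out = solution_alt n m x y queries
instance (n : Int) (m : Int) (x : Int) (y : Int) (queries : List (Int × Int)) (out : Int) : Decidable (Spec_solution n m x y queries out) := by unfold Spec_solution; infer_instance

-- ===== CLAIM (what is proved, stated in full; the proofs are below) =====
def Claim_equal_solution : Prop := ∀ (n : Int) (m : Int) (x : Int) (y : Int) (queries : List (Int × Int)), Dom_solution n m x y queries → Spec_solution n m x y queries (solution n m x y queries)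

-- ===== LEMMAS AND PROOFS =====

-- Linear front-to-back reference run used to relate the two ports.
def runL (height width : Int) (qs : List (Int × Int)) (st : Int × Int × Int × Int) :
    Option (Int × Int × Int × Int) :=
  match qs with
  | [] => some st
  | q :: rest =>
    match stepB height width q st with
    | none => none
    | some s => runL height width rest s

-- A's loop equals interpreting the linear reference run.
theorem loopA_eq_runL (height width : Int) (qs : List (Int × Int)) :
    ∀ (top bottom left right : Int),
      loopA height width top bottom left right qs =
        (match runL height width qs (top, bottom, left, right) with
         | none => 0
         | some (t, b, l, r) => (b - t + 1) * (r - l + 1)) := by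
  induction qs with
  | nil => intro top bottom left right; simp [loopA, runL]
  | cons q rest ih =>
    intro top bottom left right
    obtain ⟨c, d⟩ := q
    simp only [loopA, runL, stepB, shrinkBack, shrinkFwd]
    by_cases h0 : c = 0 <;> by_cases h1 : c = 1 <;> by_cases h2 : c = 2 <;>
      simp only [h0, h1, h2, if_pos, ite_false, ne_eq] <;>
      split_ifs <;> (try dsimp only at *) <;> first | rfl | omega | rw [ih]

-- runL over an append.
theorem runL_append (height width : Int) (a b : List (Int × Int)) :
    ∀ st, runL height width (a ++ b) st =
      (match runL height width a st with
       | none => none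
       | some s => runL height width b s) := by
  induction a with
  | nil => intro st; simp [runL]
  | cons q rest ih =>
    intro st
    simp only [List.cons_append, runL]
    cases stepB height width q st with
    | none => rfl
    | some s => exact ih s

theorem runB_none (height width : Int) (qs : List (Int × Int)) :
    runB height width qs none = none := by
  cases qs with
  | nil => simp [runB]
  | cons q rest => cases rest <;> simp [runB]

-- The divide-and-conquer run equals the linear run on the reversed list.
theorem runB_eq_runL (height width : Int) :
    ∀ (n : Nat) (qs : List (Int × Int)), qs.length ≤ n →
      ∀ st, runB height width qs (some st) = runL height width qs.reverse st := by
  intro n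
  induction n with
  | zero =>
    intro qs hlen st
    have : qs = [] := List.length_eq_zero_iff.mp (Nat.le_zero.mp hlen)
    subst this; simp [runB, runL]
  | succ n ih =>
    intro qs hlen st
    match qs with
    | [] => simp [runB, runL]
    | [q] =>
      simp only [runB, List.reverse_singleton, runL]
      cases stepB height width q st <;> rfl
    | q1 :: q2 :: rest =>
      rw [runB]
      have hsplit : (q1 :: q2 :: rest).reverse =
          ((q1 :: q2 :: rest).drop ((q1 :: q2 :: rest).length / 2)).reverse ++
            ((q1 :: q2 :: rest).take ((q1 :: q2 :: rest).length / 2)).reverse := by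
        rw [← List.reverse_append, List.take_append_drop]
      rw [hsplit, runL_append]
      have hlq : (q1 :: q2 :: rest).length = rest.length + 2 := by simp
      have htake : ((q1 :: q2 :: rest).take ((q1 :: q2 :: rest).length / 2)).length ≤ n := by
        simp; omega
      have hdrop : ((q1 :: q2 :: rest).drop ((q1 :: q2 :: rest).length / 2)).length ≤ n := by
        simp; omega
      have hd := ih _ hdrop st
      simp only [List.length_cons] at hd ⊢
      rw [hd]
      cases h : runL height width
          ((q1 :: q2 :: rest).drop ((rest.length + 1 + 1) / 2)).reverse st with
      | none => simp [runB_none]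
      | some s =>
        have ht := ih _ htake s
        simp only [List.length_cons] at ht
        rw [ht]

-- ===== VERDICT (by name: the statement is the Claim_ definition above) =====
theorem solution_spec : Claim_equal_solution := by
  intro n m x y queries _
  unfold Spec_solution solution solution_alt
  rw [loopA_eq_runL,
    runB_eq_runL (n - 1) (m - 1) queries.length queries (Nat.le_refl _) (x, x, y, y)]
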